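-- pv_equiv track=rewrite | github.com/audrey-vmsy/CS199-TreePosetCoverProblem | Utils/TreePoset_Utils_v2.py | group_linearOrders_by_its_root
-- ===== SOURCE A (Python) =====
-- def group_linearOrders_by_its_root(upsilon):
--     grouped_upsilon = {}
--     for linearOrder in upsilon:
--         root = linearOrder[0]
--         if root in grouped_upsilon:
--             grouped_upsilon[root].append(linearOrder)
--         else:
--             grouped_upsilon[root] = [linearOrder]
--
--     return list(grouped_upsilon.values())
-- ===== SOURCE B (Python) =====
-- def group_linearOrders_by_its_root(upsilon):
--     roots = []
--     for linearOrder in upsilon: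
--         if linearOrder[0] not in roots:
--             roots.append(linearOrder[0])
--     return [[lo for lo in upsilon if lo[0] == r] for r in roots]
-- ===== Notes on version B (the rewrite author's own statement) =====
-- stated objective: alternative
-- what changed: Replaces the single-pass dict-of-lists accumulation by a two-phase decomposition: first collect the distinct roots in order of first appearance, then build each group by filtering the whole input per root.
import Mathlib
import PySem

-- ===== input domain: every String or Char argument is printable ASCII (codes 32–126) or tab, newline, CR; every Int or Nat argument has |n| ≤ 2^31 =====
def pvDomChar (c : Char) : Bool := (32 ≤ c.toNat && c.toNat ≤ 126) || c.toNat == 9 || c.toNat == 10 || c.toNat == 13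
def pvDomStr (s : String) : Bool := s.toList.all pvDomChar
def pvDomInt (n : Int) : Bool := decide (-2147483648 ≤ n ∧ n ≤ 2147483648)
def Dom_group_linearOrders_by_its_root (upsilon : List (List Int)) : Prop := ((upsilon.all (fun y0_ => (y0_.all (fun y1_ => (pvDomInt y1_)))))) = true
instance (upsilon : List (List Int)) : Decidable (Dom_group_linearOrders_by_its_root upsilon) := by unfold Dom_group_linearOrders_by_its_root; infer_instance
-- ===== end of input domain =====

-- B groups by a different decomposition (distinct roots first, then one filtering pass per root);
-- equivalence is about the return value on inputs whose linear orders are all nonempty.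

-- ===== PORT A =====
-- A: one pass building an insertion-ordered dict root ↦ list of linear orders, then its values.
def group_linearOrders_by_its_root (upsilon : List (List Int)) : List (List (List Int)) :=
  let grouped :=
    upsilon.foldl (fun d linearOrder =>
      match PySem.List.pyGet? linearOrder 0 with
      | none => d     -- Python raises IndexError here; excluded by Pre_
      | some root =>
        if d.contains root then d.modify root [] (fun g => g ++ [linearOrder])
        else d.insert root [linearOrder]) PySem.Dict.empty
  grouped.values

-- ===== PORT B =====
-- B: distinct roots in order of first appearance, then one filter of upsilon per root.
def group_linearOrders_by_its_root_alt (upsilon : List (List Int)) : List (List (List Int)) :=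
  let roots :=
    upsilon.foldl (fun rs linearOrder =>
      match PySem.List.pyGet? linearOrder 0 with
      | none => rs    -- Python raises IndexError here; excluded by Pre_
      | some r => PySem.Set.add rs r) ([] : List Int)
  roots.map (fun r => upsilon.filter (fun lo => PySem.List.pyGet? lo 0 == some r))

-- ===== PRECONDITION & SPEC =====
-- Pre_ excludes exactly the inputs containing an empty linear order, on which A raises IndexError.
def Pre_group_linearOrders_by_its_root (upsilon : List (List Int)) : Prop :=
  ∀ lo ∈ upsilon, lo ≠ []
instance (upsilon : List (List Int)) : Decidable (Pre_group_linearOrders_by_its_root upsilon) := by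
  unfold Pre_group_linearOrders_by_its_root; infer_instance

def pvWitness_group_linearOrders_by_its_root : List (List Int) := [[1, 2], [1, 3], [2, 1]]

def Spec_group_linearOrders_by_its_root (upsilon : List (List Int)) (out : List (List (List Int))) : Prop :=
  out = group_linearOrders_by_its_root_alt upsilon
instance (upsilon : List (List Int)) (out : List (List (List Int))) : Decidable (Spec_group_linearOrders_by_its_root upsilon out) := by
  unfold Spec_group_linearOrders_by_its_root; infer_instance

-- ===== CLAIM (what is proved, stated in full; the proofs are below) =====
def Claim_equal_group_linearOrders_by_its_root : Prop :=
  ∀ (upsilon : List (List Int)), Dom_group_linearOrders_by_its_root upsilon →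
    Pre_group_linearOrders_by_its_root upsilon →
    Spec_group_linearOrders_by_its_root upsilon (group_linearOrders_by_its_root upsilon)

-- ===== LEMMAS AND PROOFS =====

-- Under Pre_, every linearOrder in upsilon is nonempty, so xs[0] is some xs.headI.
theorem pv_pyGet0 (lo : List Int) (h : lo ≠ []) :
    PySem.List.pyGet? lo 0 = some lo.headI := by
  cases lo with
  | nil => exact absurd rfl h
  | cons x xs => simp

-- A's loop step, under Pre_, is a modify keyed by the head.
theorem pvA_fold_eq (upsilon : List (List Int)) (h : ∀ lo ∈ upsilon, lo ≠ []) :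
    (upsilon.foldl (fun d linearOrder =>
      match PySem.List.pyGet? linearOrder 0 with
      | none => d
      | some root =>
        if d.contains root then d.modify root [] (fun g => g ++ [linearOrder])
        else d.insert root [linearOrder]) PySem.Dict.empty)
    = upsilon.foldl (fun d lo => d.modify lo.headI [] (fun g => g ++ [lo])) PySem.Dict.empty := by
  apply PySem.List.foldl_congr_mem
  intro d lo hmem
  rw [pv_pyGet0 lo (h lo hmem)]
  simp only
  by_cases hc : d.contains lo.headI = true
  · simp [hc]
  · have hc' : d.contains lo.headI = false := by simpa using hc
    simp only [PySem.Dict.modify, hc', Bool.false_eq_true, if_false]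
    simp [PySem.Dict.getD_of_not_contains, hc']

-- B's roots loop, under Pre_, is Set.ofList of the heads.
theorem pvB_roots_eq (upsilon : List (List Int)) (h : ∀ lo ∈ upsilon, lo ≠ []) :
    (upsilon.foldl (fun rs linearOrder =>
      match PySem.List.pyGet? linearOrder 0 with
      | none => rs
      | some r => PySem.Set.add rs r) ([] : List Int))
    = PySem.Set.ofList (upsilon.map (fun lo => lo.headI)) := by
  rw [PySem.Set.ofList_eq_foldl, List.foldl_map]
  apply PySem.List.foldl_congr_mem
  intro rs lo hmem
  rw [pv_pyGet0 lo (h lo hmem)]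

theorem group_spec_aux (upsilon : List (List Int))
    (h : ∀ lo ∈ upsilon, lo ≠ []) :
    group_linearOrders_by_its_root upsilon = group_linearOrders_by_its_root_alt upsilon := by
  unfold group_linearOrders_by_its_root group_linearOrders_by_its_root_alt
  simp only
  rw [pvA_fold_eq upsilon h, pvB_roots_eq upsilon h]
  -- view A's fold as a fold over (head, lo) pairs to use the grouping lemmas
  have hpair :
      (upsilon.foldl (fun d lo => d.modify lo.headI [] (fun g => g ++ [lo])) PySem.Dict.empty)
      = ((upsilon.map (fun lo => (lo.headI, lo))).foldl
          (fun d p => d.modify p.1 [] (fun g => g ++ [p.2])) PySem.Dict.empty) := by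
    rw [List.foldl_map]
  rw [hpair]
  set l := upsilon.map (fun lo => (lo.headI, lo)) with hl
  have hnd : ((l.foldl (fun d p => d.modify p.1 [] (fun g => g ++ [p.2])) PySem.Dict.empty)).keys.Nodup := by
    exact PySem.Dict.nodup_keys_foldl_modify_key l (fun p => p.1) [] (fun _ p g => g ++ [p.2])
      PySem.Dict.empty (by simp)
  rw [PySem.Dict.values_eq_map_keys _ hnd []]
  have hkeys : ((l.foldl (fun d p => d.modify p.1 [] (fun g => g ++ [p.2])) PySem.Dict.empty)).keys
      = PySem.Set.ofList (upsilon.map (fun lo => lo.headI)) := by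
    rw [PySem.Dict.keys_foldl_modify_key]
    simp only [PySem.Dict.keys_empty, hl, List.map_map]
    rw [PySem.Set.ofList_eq_foldl]
    rfl
  rw [hkeys]
  apply List.map_congr_left
  intro r _
  rw [PySem.Dict.getD_foldl_modify_append]
  simp only [PySem.Dict.getD_empty, List.nil_append, hl, List.filter_map, List.map_map,
    Function.comp_def, List.map_id']
  apply List.filter_congr
  intro lo hmem
  rw [pv_pyGet0 lo (h lo hmem)]
  simp

-- ===== VERDICT (by name: the statement is the Claim_ definition above) =====
theorem group_linearOrders_by_its_root_spec : Claim_equal_group_linearOrders_by_its_root := by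
  intro upsilon _ hpre
  exact group_spec_aux upsilon hpre
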